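-- pv_equiv track=rewrite | github.com/QinZhen001/CodeNut | CodeNutAPI/tools/HashIDs.py | __dehash
-- ===== SOURCE A (Python) =====
-- def __dehash(data, alphabet):
--     number = 0
--
--     if len(data) and alphabet:
--         alphabetLength = len(alphabet)
--         inputChars = data[::1]
--
--         for idx, character in enumerate(inputChars):
--             pos = alphabet.find(character)
--             number += pos * pow(alphabetLength, (len(data) - idx - 1))
--
--     return number
-- ===== SOURCE B (Python) =====
-- def __dehash(data, alphabet):
--     if not alphabet:
--         return 0
--
--     def value(s):
--         if len(s) <= 1:
--             return alphabet.find(s) if s else 0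
--         mid = len(s) // 2
--         return value(s[:mid]) * len(alphabet) ** (len(s) - mid) + value(s[mid:])
--
--     return value(data)
-- ===== Notes on version B (the rewrite author's own statement) =====
-- stated objective: faster
-- what changed: Replaces A's linear enumerate loop (per-character alphabet.find plus a fresh pow() per position) with a divide-and-conquer recursion that halves the string and combines the two halves' values with one big power, so bigint work is balanced instead of accumulated linearly.
import Mathlib
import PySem

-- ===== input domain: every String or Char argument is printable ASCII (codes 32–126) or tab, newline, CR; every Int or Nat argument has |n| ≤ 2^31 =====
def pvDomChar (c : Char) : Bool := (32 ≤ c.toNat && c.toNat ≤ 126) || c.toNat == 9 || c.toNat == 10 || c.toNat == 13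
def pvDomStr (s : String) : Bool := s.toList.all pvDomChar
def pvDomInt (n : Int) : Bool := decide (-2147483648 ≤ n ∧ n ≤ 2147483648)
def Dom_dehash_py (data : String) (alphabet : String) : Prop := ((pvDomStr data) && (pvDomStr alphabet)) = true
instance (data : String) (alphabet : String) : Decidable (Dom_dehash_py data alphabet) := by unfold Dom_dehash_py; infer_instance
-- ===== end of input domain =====

-- B replaces A's linear per-character loop (find + fresh pow per position) by a
-- divide-and-conquer recursion on string halves (objective: faster).

-- ===== PORT A =====
def dehash_py (data : String) (alphabet : String) : Int :=
  let number : Int := 0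
  if PySem.Str.len data ≠ 0 ∧ ¬(alphabet = "") then
    let alphabetLength : Int := PySem.Str.len alphabet
    let inputChars : List Char := (PySem.List.slice? data.toList none none 1).getD []
    (PySem.List.enumerate inputChars 0).foldl
      (fun number p =>
        number + PySem.Chars.find alphabet.toList [p.2] *
          alphabetLength ^ (PySem.Str.len data - p.1 - 1).toNat) number
  else number

-- ===== PORT B =====
-- inner helper 'value': s[:mid] / s[mid:] with 0 ≤ mid ≤ len(s) are exactly take/drop
-- (PySem.List.slice_to_natCast / slice_from_natCast); alphabet.find(s) for the 1-char s is Chars.find.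
def pvAltValue (alph : List Char) (s : List Char) : Int :=
  if s.length ≤ 1 then
    if s = [] then 0 else PySem.Chars.find alph s
  else
    let mid := s.length / 2
    pvAltValue alph (s.take mid) * (alph.length : Int) ^ (s.length - mid) +
      pvAltValue alph (s.drop mid)
termination_by s.length
decreasing_by
  · simp only [List.length_take]; omega
  · simp only [List.length_drop]; omega

def dehash_py_alt (data : String) (alphabet : String) : Int :=
  if alphabet = "" then 0
  else pvAltValue alphabet.toList data.toList

-- ===== PRECONDITION & SPEC =====
def Spec_dehash_py (data : String) (alphabet : String) (out : Int) : Prop := out = dehash_py_alt data alphabet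
instance (data : String) (alphabet : String) (out : Int) : Decidable (Spec_dehash_py data alphabet out) := by unfold Spec_dehash_py; infer_instance

-- ===== CLAIM (what is proved, stated in full; the proofs are below) =====
def Claim_equal_dehash_py : Prop := ∀ (data : String) (alphabet : String), Dom_dehash_py data alphabet → Spec_dehash_py data alphabet (dehash_py data alphabet)

-- ===== LEMMAS AND PROOFS =====

-- xs[::1] is xs
theorem pv_fm_range {α : Type} (xs : List α) :
    List.filterMap (fun x => xs[x]?) (List.range xs.length) = xs := by
  induction xs using List.reverseRecOn with
  | nil => simp
  | append_singleton ys y ih =>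
    have h1 : List.filterMap (fun x => (ys ++ [y])[x]?) (List.range ys.length)
        = List.filterMap (fun x => ys[x]?) (List.range ys.length) := by
      apply List.filterMap_congr
      intro x hx
      rw [List.getElem?_append_left (List.mem_range.mp hx)]
    simp [List.range_succ, List.filterMap_append, h1, ih]

theorem pv_slice_one {α : Type} (xs : List α) : PySem.List.slice? xs none none 1 = some xs := by
  simp [PySem.List.slice?, PySem.List.sliceIndices]
  have h : (if 0 < xs.length then xs.length else 0) = xs.length := by split <;> omega
  rw [h, pv_fm_range]

-- the common "position of c in alph, -1 if absent" value
def pvPos (alph : List Char) (c : Char) : Int :=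
  match PySem.List.index? alph c with
  | some k => (k : Int)
  | none => -1

theorem pv_find_singleton (s : List Char) (c : Char) :
    PySem.Chars.find s [c] = pvPos s c := by
  unfold pvPos
  cases h : PySem.List.index? s c with
  | none =>
    have hc : c ∉ s := (PySem.List.index?_eq_none_iff s c).mp h
    rw [PySem.Chars.find_eq_neg_one_iff]
    exact fun hi => hc (hi.sublist.subset (by simp))
  | some k =>
    obtain ⟨hk, hks, hmin'⟩ := PySem.List.getElem_of_index?_eq_some h
    have hmem : c ∈ s := by rw [← hks]; exact List.getElem_mem hk
    obtain ⟨l, r, hlr⟩ := List.append_of_mem hmem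
    have hinf : [c] <:+: s := ⟨l, r, by simp [hlr]⟩
    have hnn : 0 ≤ PySem.Chars.find s [c] := (PySem.Chars.find_nonneg_iff s [c]).mpr hinf
    obtain ⟨hpre, hmin⟩ := PySem.Chars.find_spec hnn
    set n := (PySem.Chars.find s [c]).toNat with hn
    have hlt : n < s.length := by
      by_contra hge
      rw [List.drop_eq_nil_of_le (by omega)] at hpre
      simpa using hpre.length_le
    have hgn : s[n] = c := by
      have := hpre.getElem (i := 0) (by simp)
      simpa using this.symm
    have hne : n = k := by
      rcases Nat.lt_trichotomy n k with hlt' | he | hgt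
      · exact absurd hgn (hmin' n hlt')
      · exact he
      · exact absurd ⟨s.drop (k + 1), by rw [List.drop_eq_getElem_cons hk]; simp [hks]⟩ (hmin k hgt)
    have hfk : PySem.Chars.find s [c] = (k : Int) := by omega
    rw [hfk]

-- the positional value A's loop computes
def pvVal (alph : List Char) : List Char → Int
  | [] => 0
  | c :: t => pvPos alph c * (alph.length : Int) ^ t.length + pvVal alph t

theorem pv_A_loop (alph : List Char) (N : Nat) :
    ∀ (cs : List Char) (s : Nat) (acc : Int), s + cs.length = N →
      (PySem.List.enumerate cs (s : Int)).foldl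
        (fun a p => a + PySem.Chars.find alph [p.2] *
          ((alph.length : Int)) ^ (((N : Int)) - p.1 - 1).toNat) acc
      = acc + pvVal alph cs := by
  intro cs
  induction cs with
  | nil => intro s acc _; simp [PySem.List.enumerate_nil, pvVal]
  | cons c t ih =>
    intro s acc hlen
    rw [PySem.List.enumerate_cons, List.foldl_cons]
    have hexp : (((N : Int)) - (s : Int) - 1).toNat = t.length := by
      simp at hlen; omega
    have hcast : ((s : Int) + 1) = (((s + 1 : Nat)) : Int) := by push_cast; ring
    rw [hcast, ih (s + 1) _ (by simp at hlen ⊢; omega)]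
    simp only [hexp, pv_find_singleton, pvVal]
    ring

-- positional value splits over append with one power of the base
theorem pv_val_append (alph : List Char) (l r : List Char) :
    pvVal alph (l ++ r) = pvVal alph l * (alph.length : Int) ^ r.length + pvVal alph r := by
  induction l with
  | nil => simp [pvVal]
  | cons c t ih =>
    simp only [List.cons_append, pvVal, ih, List.length_append]
    rw [pow_add]
    ring

-- the divide-and-conquer recursion computes the positional value
theorem pv_alt_eq (alph : List Char) : ∀ (n : Nat) (s : List Char), s.length = n →
    pvAltValue alph s = pvVal alph s := by
  intro n
  induction n using Nat.strong_induction_on with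
  | _ n ih =>
    intro s hs
    rw [pvAltValue]
    by_cases h1 : s.length ≤ 1
    · match s with
      | [] => simp [pvVal]
      | [c] =>
        simp only [List.length_cons, List.length_nil, pvVal, pow_zero]
        rw [pv_find_singleton]
        simp
      | c :: d :: t => simp at h1
    · simp only [if_neg h1]
      have h2 : 2 ≤ s.length := by omega
      have hmid1 : 1 ≤ s.length / 2 := by omega
      have hmid2 : s.length / 2 < s.length := by omega
      have htl : (s.take (s.length / 2)).length = s.length / 2 := by
        simp; omega
      have hdl : (s.drop (s.length / 2)).length = s.length - s.length / 2 := by simp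
      rw [ih (s.take (s.length / 2)).length (by omega) _ rfl,
          ih (s.drop (s.length / 2)).length (by rw [hdl]; omega) _ rfl]
      have := pv_val_append alph (s.take (s.length / 2)) (s.drop (s.length / 2))
      rw [List.take_append_drop] at this
      rw [this, hdl]

-- ===== VERDICT (by name: the statement is the Claim_ definition above) =====
theorem dehash_py_spec : Claim_equal_dehash_py := by
  unfold Claim_equal_dehash_py Spec_dehash_py
  intro data alphabet _
  unfold dehash_py dehash_py_alt
  by_cases ha : alphabet = ""
  · simp [ha]
  · simp only [ha, if_false, not_false_iff, and_true, ite_not]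
    rw [pv_alt_eq alphabet.toList data.toList.length data.toList rfl]
    by_cases hd : PySem.Str.len data = 0
    · have hnil : data.toList = [] := by
        have := hd
        simp [PySem.Str.len] at this
        simpa using this
      simp [hnil, pvVal]
    · simp only [hd, if_false]
      rw [pv_slice_one]
      simp only [Option.getD_some]
      have hlen : PySem.Str.len data = (data.toList.length : Int) := by
        simp [PySem.Str.len]
      have hlenA : PySem.Str.len alphabet = (alphabet.toList.length : Int) := by
        simp [PySem.Str.len]
      rw [hlen, hlenA]
      have := pv_A_loop alphabet.toList data.toList.length data.toList 0 0 (by simp)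
      simp only [Nat.cast_zero] at this
      rw [this]
      simp
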